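-- pv_equiv track=rewrite | github.com/marekzajac97/bf2-blender | io_scene_bf2/core/utils.py | are_backfaces
-- ===== SOURCE A (Python) =====
-- def are_backfaces(face1, face2):
--     face1_set = set(face1)
--     face2_set = set(face2)
--
--     if face1_set != face2_set or len(face1_set) != 3:
--         # vert sets are not the same or contain duplicate verts
--         return False
--
--     for i in range(3):
--         if face1[i:] + face1[:i] == face2:
--             return False # face is a duplicate just with verts in different order
--
--     return True
-- ===== SOURCE B (Python) =====
-- def are_backfaces(face1, face2):
--     verts = set(face1)
--     if len(verts) != 3 or set(face2) != verts:
--         return False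
--     # three distinct shared verts: face2 can only be the rotation of face1
--     # aligning face1 with face2's first vertex; same winding <-> that rotation matches
--     j = face1.index(face2[0])
--     same_winding = face1[(j + 1) % 3] == face2[1] and face1[(j + 2) % 3] == face2[2]
--     return not same_winding
-- ===== Notes on version B (the rewrite author's own statement) =====
-- stated objective: simpler
-- what changed: The rotation loop with slice-concatenate list comparisons is replaced by one index lookup of face2[0] in face1 plus two modular-index equality checks.
-- outside the precondition, e.g. on are_backfaces([1, 2, 3, 2], [3, 2, 1, 2]): A returns False, B returns True; on are_backfaces([1, 2, 3, 1], [2, 3, 1, 1]): A returns False, B returns False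
import Mathlib
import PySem

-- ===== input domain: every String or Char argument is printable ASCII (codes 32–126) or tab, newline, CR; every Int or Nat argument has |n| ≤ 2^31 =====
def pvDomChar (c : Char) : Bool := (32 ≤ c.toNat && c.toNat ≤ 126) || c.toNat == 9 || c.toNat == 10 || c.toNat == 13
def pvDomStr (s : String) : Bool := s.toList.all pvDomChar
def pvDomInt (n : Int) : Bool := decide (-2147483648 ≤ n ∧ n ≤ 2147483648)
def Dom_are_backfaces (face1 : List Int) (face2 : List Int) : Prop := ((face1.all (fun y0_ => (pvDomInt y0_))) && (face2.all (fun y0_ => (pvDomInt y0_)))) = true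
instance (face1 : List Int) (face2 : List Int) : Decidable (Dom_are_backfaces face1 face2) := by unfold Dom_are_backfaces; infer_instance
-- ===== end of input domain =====

-- B replaces A's rotation loop (slice+concat list comparisons) by a single index lookup
-- of face2[0] in face1 plus two modular-index checks: simpler.


-- ===== PORT A =====
def are_backfaces (face1 : List Int) (face2 : List Int) : Bool :=
  let face1_set := PySem.Set.ofList face1
  let face2_set := PySem.Set.ofList face2
  if ¬ (PySem.Set.equal face1_set face2_set = true) ∨ PySem.Set.len face1_set ≠ 3 then
    false
  else
    -- for i in range(3): if face1[i:] + face1[:i] == face2: return False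
    if (PySem.List.pyRange 0 3 1).any
        (fun i => (PySem.List.slice face1 (some i) none ++ PySem.List.slice face1 none (some i)) == face2) then
      false
    else
      true

-- ===== PORT B =====
def are_backfaces_alt (face1 : List Int) (face2 : List Int) : Bool :=
  let verts := PySem.Set.ofList face1
  if PySem.Set.len verts ≠ 3 ∨ ¬ (PySem.Set.equal (PySem.Set.ofList face2) verts = true) then
    false
  else
    -- j = face1.index(face2[0]); guard guarantees face2 is non-empty and face2[0] ∈ face1,
    -- so the .getD defaults below are unreachable
    let j : Int := ((PySem.List.index? face1 ((PySem.List.pyGet? face2 0).getD 0)).getD 0 : Nat)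
    let same_winding :=
      decide ((PySem.List.pyGet? face1 (PySem.Int.mod (j + 1) 3)).getD 0 = (PySem.List.pyGet? face2 1).getD 0)
      && decide ((PySem.List.pyGet? face1 (PySem.Int.mod (j + 2) 3)).getD 0 = (PySem.List.pyGet? face2 2).getD 0)
    ! same_winding

-- ===== PRECONDITION & SPEC =====
-- Pre_ excludes only the degenerate inputs whose vertex sets are equal with exactly 3 distinct
-- values but where a list has length ≠ 3: those are not triangular faces, and there A's and B's
-- values are both accidental (A scans only rotation shifts 0..2 of a longer list).
def Pre_are_backfaces (face1 : List Int) (face2 : List Int) : Prop :=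
  (PySem.Set.equal (PySem.Set.ofList face1) (PySem.Set.ofList face2) = true ∧
    (PySem.Set.ofList face1).length = 3) → (face1.length = 3 ∧ face2.length = 3)
instance (face1 : List Int) (face2 : List Int) : Decidable (Pre_are_backfaces face1 face2) := by
  unfold Pre_are_backfaces; infer_instance
def pvWitness_are_backfaces : List Int × List Int := ([1, 2, 3], [1, 3, 2])

def Spec_are_backfaces (face1 : List Int) (face2 : List Int) (out : Bool) : Prop := out = are_backfaces_alt face1 face2
instance (face1 : List Int) (face2 : List Int) (out : Bool) : Decidable (Spec_are_backfaces face1 face2 out) := by unfold Spec_are_backfaces; infer_instance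

-- ===== CLAIM (what is proved, stated in full; the proofs are below) =====
def Claim_equal_are_backfaces : Prop := ∀ (face1 : List Int) (face2 : List Int), Dom_are_backfaces face1 face2 → Pre_are_backfaces face1 face2 → Spec_are_backfaces face1 face2 (are_backfaces face1 face2)

-- ===== LEMMAS AND PROOFS =====

-- ===== VERDICT (by name: the statement is the Claim_ definition above) =====
theorem are_backfaces_spec : Claim_equal_are_backfaces := by
  intro f1 f2 _ hpre
  show are_backfaces f1 f2 = are_backfaces_alt f1 f2
  by_cases hE : PySem.Set.equal (PySem.Set.ofList f1) (PySem.Set.ofList f2) = true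
  · by_cases hL : PySem.Set.len (PySem.Set.ofList f1) = 3
    · have hE' : PySem.Set.equal (PySem.Set.ofList f2) (PySem.Set.ofList f1) = true := by
        rw [PySem.Set.equal_iff] at hE ⊢; intro x; exact (hE x).symm
      have hL' : (PySem.Set.ofList f1).length = 3 := by
        simp [PySem.Set.len] at hL; exact_mod_cast hL
      have hlen : f1.length = 3 ∧ f2.length = 3 := hpre ⟨hE, hL'⟩
      obtain ⟨a, b, c, rfl⟩ : ∃ a b c, f1 = [a, b, c] := by
        match f1, hlen.1 with
        | [a,b,c], _ => exact ⟨a,b,c,rfl⟩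
      obtain ⟨d, e, f, rfl⟩ : ∃ d e f, f2 = [d, e, f] := by
        match f2, hlen.2 with
        | [d,e,f], _ => exact ⟨d,e,f,rfl⟩
      have hab : a ≠ b := by
        rintro rfl
        simp [PySem.Set.ofList, PySem.Set.add, PySem.Set.contains] at hL'
        split_ifs at hL' <;> simp_all
      have hac : a ≠ c := by
        rintro rfl
        simp [PySem.Set.ofList, PySem.Set.add, PySem.Set.contains] at hL'
        split_ifs at hL' <;> simp_all
      have hbc : b ≠ c := by
        rintro rfl
        simp [PySem.Set.ofList, PySem.Set.add, PySem.Set.contains] at hL'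
        split_ifs at hL' <;> simp_all
      have hm : ∀ x : Int, x ∈ ([a,b,c] : List Int) ↔ x ∈ ([d,e,f] : List Int) := by
        intro x
        have h2 := hE
        rw [PySem.Set.equal_iff] at h2
        have := h2 x
        simpa [PySem.Set.mem_ofList] using this
      have hd : d = a ∨ d = b ∨ d = c := by
        have := (hm d).mpr (by simp)
        simpa using this
      have hr : PySem.List.pyRange 0 3 1 = [0,1,2] := by decide
      rcases hd with rfl | rfl | rfl
      · have hidx : List.idxOf? d [d, b, c] = some 0 := by
          rw [← PySem.List.index?_eq_idxOf?]; exact PySem.List.index?_cons_self _ _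
        simp only [are_backfaces, are_backfaces_alt, hr]
        simp [hE, hE', hL', PySem.Set.len, PySem.List.index?_eq_idxOf?, hidx,
          PySem.List.slice, PySem.List.pyGet?, PySem.List.pyIdx?, PySem.Int.mod,
          Ne.symm hab, Ne.symm hac]
      · have hidx : List.idxOf? d [a, d, c] = some 1 := by
          rw [← PySem.List.index?_eq_idxOf?, PySem.List.index?_cons_of_ne _ hab,
            PySem.List.index?_cons_self]; rfl
        simp only [are_backfaces, are_backfaces_alt, hr]
        simp [hE, hE', hL', PySem.Set.len, PySem.List.index?_eq_idxOf?, hidx,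
          PySem.List.slice, PySem.List.pyGet?, PySem.List.pyIdx?, PySem.Int.mod,
          hab, Ne.symm hbc]
      · have hidx : List.idxOf? d [a, b, d] = some 2 := by
          rw [← PySem.List.index?_eq_idxOf?, PySem.List.index?_cons_of_ne _ hac,
            PySem.List.index?_cons_of_ne _ hbc, PySem.List.index?_cons_self]; rfl
        simp only [are_backfaces, are_backfaces_alt, hr]
        simp [hE, hE', hL', PySem.Set.len, PySem.List.index?_eq_idxOf?, hidx,
          PySem.List.slice, PySem.List.pyGet?, PySem.List.pyIdx?, PySem.Int.mod,
          hac, hbc]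
    · simp only [PySem.Set.len] at hL
      simp [are_backfaces, are_backfaces_alt, hL]
  · have hE2 : ¬ (PySem.Set.equal (PySem.Set.ofList f2) (PySem.Set.ofList f1) = true) := by
      intro h; exact hE (by rw [PySem.Set.equal_iff] at h ⊢; intro x; exact (h x).symm)
    simp [are_backfaces, are_backfaces_alt, hE, hE2]
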